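-- pv_equiv track=rewrite | github.com/katymun/AR-lab | dungeon.py | sanitize_plan
-- ===== SOURCE A (Python) =====
-- def sanitize_plan(plan, zmin=0, zmax=4, max_run_stairs=2):
--     """Remove illegal stairs at bounds (heuristic) and cap U/D runs."""
--     # Since we don't know z during rewriting, we only collapse long runs.
--     out = []
--     run_ch, run_len = None, 0
--     for ch in plan:
--         if ch in ('U','D'):
--             if ch == run_ch:
--                 run_len += 1
--             else:
--                 run_ch, run_len = ch, 1
--             if run_len <= max_run_stairs:
--                 out.append(ch)
--             # else: drop extra stairs in the run
--         else:
--             run_ch, run_len = None, 0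
--             out.append(ch)
--     return ''.join(out)
-- ===== SOURCE B (Python) =====
-- def sanitize_plan(plan, zmin=0, zmax=4, max_run_stairs=2):
--     """Remove illegal stairs at bounds (heuristic) and cap U/D runs."""
--     frags = []
--     i, n = 0, len(plan)
--     while i < n:
--         ch = plan[i]
--         j = i
--         while j < n and plan[j] == ch:
--             j += 1
--         run_len = j - i
--         if ch in 'UD':
--             frags.append(ch * min(run_len, max_run_stairs))
--         else:
--             frags.append(ch * run_len)
--         i = j
--     return ''.join(frags)
-- ===== Notes on version B (the rewrite author's own statement) =====
-- stated objective: alternative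
-- what changed: Replaces A's flat character loop with run-tracking state (run_ch/run_len carried across iterations) by an explicit two-level scan that finds each maximal run of identical characters and emits its capped fragment at once via string multiplication (ch * min(run_len, max_run_stairs)).
import Mathlib
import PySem

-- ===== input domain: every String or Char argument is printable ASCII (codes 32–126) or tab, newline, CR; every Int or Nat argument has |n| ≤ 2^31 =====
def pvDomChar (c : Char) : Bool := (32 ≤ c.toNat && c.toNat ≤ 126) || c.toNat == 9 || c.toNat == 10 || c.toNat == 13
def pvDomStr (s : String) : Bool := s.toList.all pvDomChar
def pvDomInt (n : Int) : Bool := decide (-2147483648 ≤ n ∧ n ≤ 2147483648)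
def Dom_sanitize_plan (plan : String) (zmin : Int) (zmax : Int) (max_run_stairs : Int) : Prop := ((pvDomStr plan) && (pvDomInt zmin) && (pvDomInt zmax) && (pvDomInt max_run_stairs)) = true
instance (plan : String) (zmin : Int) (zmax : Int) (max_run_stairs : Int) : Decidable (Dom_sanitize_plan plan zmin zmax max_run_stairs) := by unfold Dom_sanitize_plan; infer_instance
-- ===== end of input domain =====

-- B replaces A's flat character loop with run-tracking state by an explicit scan over
-- maximal runs of identical characters, emitting each (capped) run at once (objective: alternative).

-- ===== PORT A =====
-- A's flat for-loop over characters with state (out, run_ch, run_len), as structural recursion.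
def sanitizeLoopA (m : Int) : List Char → List Char → Option Char → Int → List Char
  | [], out, _, _ => out
  | ch :: rest, out, run_ch, run_len =>
    if ch = 'U' ∨ ch = 'D' then
      let rc : Option Char := if some ch = run_ch then run_ch else some ch
      let rl : Int := if some ch = run_ch then run_len + 1 else 1
      if rl ≤ m then sanitizeLoopA m rest (out ++ [ch]) rc rl
      else sanitizeLoopA m rest out rc rl
    else sanitizeLoopA m rest (out ++ [ch]) none 0

def sanitize_plan (plan : String) (zmin : Int) (zmax : Int) (max_run_stairs : Int) : String :=
  (sanitizeLoopA max_run_stairs plan.toList [] none 0).asString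

-- ===== PORT B =====
-- fragment emitted for one maximal run of n copies of c (ch * min(run_len, m) resp. ch * run_len)
def runFragB (m : Int) (c : Char) (n : Nat) : List Char :=
  if c = 'U' ∨ c = 'D' then List.replicate (min (n : Int) m).toNat c
  else List.replicate n c

-- B's outer while-loop: extend the current run while the next char matches (inner while),
-- otherwise emit the run's fragment and start a new run.
def runsLoopB (m : Int) : Char → Nat → List Char → List Char
  | c, n, [] => runFragB m c n
  | c, n, x :: xs =>
    if x = c then runsLoopB m c (n + 1) xs
    else runFragB m c n ++ runsLoopB m x 1 xs

def sanitize_plan_alt (plan : String) (zmin : Int) (zmax : Int) (max_run_stairs : Int) : String :=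
  (match plan.toList with
   | [] => ([] : List Char)
   | c :: cs => runsLoopB max_run_stairs c 1 cs).asString

-- ===== PRECONDITION & SPEC =====
def Spec_sanitize_plan (plan : String) (zmin : Int) (zmax : Int) (max_run_stairs : Int) (out : String) : Prop := out = sanitize_plan_alt plan zmin zmax max_run_stairs
instance (plan : String) (zmin : Int) (zmax : Int) (max_run_stairs : Int) (out : String) : Decidable (Spec_sanitize_plan plan zmin zmax max_run_stairs out) := by unfold Spec_sanitize_plan; infer_instance

-- ===== CLAIM (what is proved, stated in full; the proofs are below) =====
def Claim_equal_sanitize_plan : Prop := ∀ (plan : String) (zmin : Int) (zmax : Int) (max_run_stairs : Int), Dom_sanitize_plan plan zmin zmax max_run_stairs → Spec_sanitize_plan plan zmin zmax max_run_stairs (sanitize_plan plan zmin zmax max_run_stairs)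

-- ===== LEMMAS AND PROOFS =====

-- growing a stair run by one: A's conditional append extends B's capped fragment
lemma runFragB_succ_stair (m : Int) (c : Char) (n : Nat) (hc : c = 'U' ∨ c = 'D') :
    runFragB m c n ++ (if ((n : Int) + 1) ≤ m then [c] else []) = runFragB m c (n + 1) := by
  simp only [runFragB, if_pos hc]
  by_cases h : ((n : Int) + 1) ≤ m
  · have h1 : min ((n : Int)) m = (n : Int) := by omega
    have h2 : min (((n : Nat) + 1 : Nat) : Int) m = ((n + 1 : Nat) : Int) := by push_cast; omega
    simp [h, h1, List.replicate_succ']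
  · have h1 : (min ((n : Int)) m).toNat = (min (((n : Nat) + 1 : Nat) : Int) m).toNat := by
      push_cast; omega
    simp [h, h1]

lemma runFragB_succ_nonstair (m : Int) (c : Char) (n : Nat) (hc : ¬ (c = 'U' ∨ c = 'D')) :
    runFragB m c n ++ [c] = runFragB m c (n + 1) := by
  simp [runFragB, if_neg hc, List.replicate_succ']

-- the first character of a run: A's conditional single append is B's fragment of length 1
lemma runFragB_one (m : Int) (c : Char) :
    runFragB m c 1 = if c = 'U' ∨ c = 'D' then (if (1 : Int) ≤ m then [c] else []) else [c] := by
  simp only [runFragB]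
  by_cases hc : c = 'U' ∨ c = 'D'
  · by_cases h : (1 : Int) ≤ m
    · have h1 : min ((1 : Nat) : Int) m = 1 := by omega
      simp [hc, h, h1]
    · simp [hc, h]
      omega
  · simp [hc]

-- main invariant: mid-run (current run = n copies of c so far, A has emitted runFragB m c n for it)
lemma loopA_eq_runsB (m : Int) (xs : List Char) : ∀ (c : Char) (n : Nat) (out : List Char),
    sanitizeLoopA m xs (out ++ runFragB m c n)
      (if c = 'U' ∨ c = 'D' then some c else none)
      (if c = 'U' ∨ c = 'D' then (n : Int) else 0)
    = out ++ runsLoopB m c n xs := by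
  induction xs with
  | nil => intro c n out; simp [sanitizeLoopA, runsLoopB]
  | cons x xs ih =>
    intro c n out
    by_cases hx : x = 'U' ∨ x = 'D'
    · by_cases hxc : x = c
      · -- same stair char: run extends
        subst hxc
        have hc : x = 'U' ∨ x = 'D' := hx
        simp only [sanitizeLoopA, runsLoopB, if_pos hx, if_true]
        have hcast : ((n : Int) + 1) = ((n + 1 : Nat) : Int) := by push_cast; ring
        have key := ih x (n + 1) out
        simp only [if_pos hc] at key
        by_cases h : ((n : Int) + 1) ≤ m
        · rw [if_pos h]
          have hfr := runFragB_succ_stair m x n hc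
          rw [if_pos h] at hfr
          rw [List.append_assoc, hfr, hcast]
          exact key
        · rw [if_neg h]
          have hfr : runFragB m x n = runFragB m x (n + 1) := by
            have h2 := runFragB_succ_stair m x n hc
            rw [if_neg h] at h2; simpa using h2
          rw [hfr, hcast]
          exact key
      · -- different char, stair: new run of x starts
        have hcond : ¬ (some x = if c = 'U' ∨ c = 'D' then some c else none) := by
          by_cases hc : c = 'U' ∨ c = 'D' <;> simp [hc, hxc]
        simp only [sanitizeLoopA, if_pos hx, if_neg hcond, runsLoopB, if_neg hxc]
        have hone : (if (1 : Int) ≤ m then out ++ runFragB m c n ++ [x]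
            else out ++ runFragB m c n) = (out ++ runFragB m c n) ++ runFragB m x 1 := by
          rw [runFragB_one m x, if_pos hx]
          by_cases h : (1 : Int) ≤ m <;> simp [h]
        by_cases h : (1 : Int) ≤ m
        · rw [if_pos h]
          have := ih x 1 (out ++ runFragB m c n)
          simp only [hx, if_pos, Nat.cast_one] at this
          rw [show out ++ runFragB m c n ++ [x] = (out ++ runFragB m c n) ++ runFragB m x 1 from by
            rw [← hone, if_pos h]]
          rw [this]; simp
        · rw [if_neg h]
          have := ih x 1 (out ++ runFragB m c n)
          simp only [hx, if_pos, Nat.cast_one] at this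
          rw [show out ++ runFragB m c n = (out ++ runFragB m c n) ++ runFragB m x 1 from by
            rw [← hone, if_neg h]]
          rw [this]; simp
    · by_cases hxc : x = c
      · -- same non-stair char: run extends (A just appends, state resets each time)
        subst hxc
        simp only [sanitizeLoopA, if_neg hx, runsLoopB, if_true]
        rw [List.append_assoc, runFragB_succ_nonstair m x n hx]
        have := ih x (n + 1) out
        simpa [hx] using this
      · -- different char, non-stair: new run of x starts
        simp only [sanitizeLoopA, if_neg hx, runsLoopB, if_neg hxc]
        have hfr : runFragB m x 1 = [x] := by rw [runFragB_one m x, if_neg hx]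
        rw [List.append_assoc, show [x] = runFragB m x 1 from hfr.symm]
        rw [← List.append_assoc]
        have := ih x 1 (out ++ runFragB m c n)
        simpa [hx] using this

-- ===== VERDICT (by name: the statement is the Claim_ definition above) =====
theorem sanitize_plan_spec : Claim_equal_sanitize_plan := by
  intro plan zmin zmax m _
  unfold Spec_sanitize_plan sanitize_plan sanitize_plan_alt
  cases hl : plan.toList with
  | nil => simp [sanitizeLoopA]
  | cons c cs =>
    congr 1
    by_cases hc : c = 'U' ∨ c = 'D'
    · simp only [sanitizeLoopA, if_pos hc]
      have hcond : ¬ (some c = (none : Option Char)) := by simp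
      rw [if_neg hcond]
      by_cases h : (1 : Int) ≤ m
      · rw [if_pos h]
        have := loopA_eq_runsB m cs c 1 []
        simp only [hc, if_pos, Nat.cast_one, List.nil_append] at this
        rw [show [c] = runFragB m c 1 from by rw [runFragB_one m c, if_pos hc, if_pos h]]
        exact this
      · rw [if_neg h]
        have := loopA_eq_runsB m cs c 1 []
        simp only [hc, if_pos, Nat.cast_one, List.nil_append] at this
        rw [show ([] : List Char) = runFragB m c 1 from by
          rw [runFragB_one m c, if_pos hc, if_neg h]]
        exact this
    · simp only [sanitizeLoopA, if_neg hc]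
      have := loopA_eq_runsB m cs c 1 []
      simp only [hc, List.nil_append, if_false] at this
      rw [show [c] = runFragB m c 1 from by rw [runFragB_one m c, if_neg hc]]
      exact this
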